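-- pv_equiv track=rewrite | github.com/SarahCoeds/senior | ai_service/lookup_requirements.py | _infer_cpu_cores
-- ===== SOURCE A (Python) =====
-- from typing import Dict, Any, Optional
--
-- def _infer_cpu_cores(text: str) -> Optional[int]:
--     t = (text or "").lower()
--     if any(k in t for k in ["i9", "ryzen 9"]):
--         return 12
--     if any(k in t for k in ["i7", "ryzen 7"]):
--         return 8
--     if any(k in t for k in ["i5", "ryzen 5"]):
--         return 6
--     if any(k in t for k in ["i3", "ryzen 3"]):
--         return 4
--     return None
-- ===== SOURCE B (Python) =====
-- from typing import Optional
--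
-- _CPU_KEYWORDS = [
--     ("i9", 12), ("ryzen 9", 12),
--     ("i7", 8), ("ryzen 7", 8),
--     ("i5", 6), ("ryzen 5", 6),
--     ("i3", 4), ("ryzen 3", 4),
-- ]
--
-- def _infer_cpu_cores(text: str) -> Optional[int]:
--     t = (text or "").lower()
--     hits = [cores for kw, cores in _CPU_KEYWORDS if kw in t]
--     return max(hits) if hits else None
-- ===== Notes on version B (the rewrite author's own statement) =====
-- stated objective: alternative
-- what changed: Replaced the four short-circuit priority branches by a single keyword->cores table scanned once, collecting all matches and reducing with max (priority order coincides with descending core count).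
import Mathlib
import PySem

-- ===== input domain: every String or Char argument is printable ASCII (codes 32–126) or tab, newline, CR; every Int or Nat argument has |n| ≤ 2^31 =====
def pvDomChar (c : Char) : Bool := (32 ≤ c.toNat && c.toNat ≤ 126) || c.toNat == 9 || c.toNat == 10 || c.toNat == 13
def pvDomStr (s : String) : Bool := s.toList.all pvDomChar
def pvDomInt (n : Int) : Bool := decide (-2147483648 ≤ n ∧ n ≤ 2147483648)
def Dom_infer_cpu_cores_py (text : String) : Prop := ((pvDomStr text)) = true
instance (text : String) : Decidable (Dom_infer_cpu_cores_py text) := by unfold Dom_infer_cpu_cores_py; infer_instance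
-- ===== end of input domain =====

-- B replaces A's four short-circuit priority branches by one keyword->cores table, collecting
-- every match and reducing with max; alternative decomposition, same cost.

-- ===== PORT A =====
def infer_cpu_cores_py (text : String) : Option Int :=
  let t := PySem.Str.lower (if text == "" then "" else text)
  if ([ "i9", "ryzen 9" ] : List String).any (fun k => PySem.Str.isIn k t) then some 12
  else if ([ "i7", "ryzen 7" ] : List String).any (fun k => PySem.Str.isIn k t) then some 8
  else if ([ "i5", "ryzen 5" ] : List String).any (fun k => PySem.Str.isIn k t) then some 6
  else if ([ "i3", "ryzen 3" ] : List String).any (fun k => PySem.Str.isIn k t) then some 4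
  else none

-- ===== PORT B =====
def cpuKeywords : List (String × Int) :=
  [("i9", 12), ("ryzen 9", 12), ("i7", 8), ("ryzen 7", 8),
   ("i5", 6), ("ryzen 5", 6), ("i3", 4), ("ryzen 3", 4)]

def infer_cpu_cores_py_alt (text : String) : Option Int :=
  let t := PySem.Str.lower (if text == "" then "" else text)
  let hits := (cpuKeywords.filter (fun p => PySem.Str.isIn p.1 t)).map Prod.snd
  PySem.List.max? hits (fun x => x)

-- ===== PRECONDITION & SPEC =====
def Spec_infer_cpu_cores_py (text : String) (out : Option Int) : Prop := out = infer_cpu_cores_py_alt text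
instance (text : String) (out : Option Int) : Decidable (Spec_infer_cpu_cores_py text out) := by unfold Spec_infer_cpu_cores_py; infer_instance

-- ===== CLAIM (what is proved, stated in full; the proofs are below) =====
def Claim_equal_infer_cpu_cores_py : Prop := ∀ (text : String), Dom_infer_cpu_cores_py text → Spec_infer_cpu_cores_py text (infer_cpu_cores_py text)

-- ===== LEMMAS AND PROOFS =====

-- ===== VERDICT (by name: the statement is the Claim_ definition above) =====
theorem infer_cpu_cores_py_spec : Claim_equal_infer_cpu_cores_py := by
  intro text _
  unfold Spec_infer_cpu_cores_py infer_cpu_cores_py infer_cpu_cores_py_alt cpuKeywords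
  set t := PySem.Str.lower (if text == "" then "" else text) with ht
  cases h1 : PySem.Chars.isIn ['i', '9'] t.toList <;>
  cases h2 : PySem.Chars.isIn ['r', 'y', 'z', 'e', 'n', ' ', '9'] t.toList <;>
  cases h3 : PySem.Chars.isIn ['i', '7'] t.toList <;>
  cases h4 : PySem.Chars.isIn ['r', 'y', 'z', 'e', 'n', ' ', '7'] t.toList <;>
  cases h5 : PySem.Chars.isIn ['i', '5'] t.toList <;>
  cases h6 : PySem.Chars.isIn ['r', 'y', 'z', 'e', 'n', ' ', '5'] t.toList <;>
  cases h7 : PySem.Chars.isIn ['i', '3'] t.toList <;>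
  cases h8 : PySem.Chars.isIn ['r', 'y', 'z', 'e', 'n', ' ', '3'] t.toList <;>
  simp [h1, h2, h3, h4, h5, h6, h7, h8, PySem.List.max?, List.filter]
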